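-- pv_equiv track=rewrite | github.com/delf1/aoc2022 | day5/day5.py | parse
-- ===== SOURCE A (Python) =====
-- def parse(lines):
--     blank = 0
--     while lines[blank] != '\n':
--         blank += 1
--     stacks = []
--     for index, char in enumerate(lines[blank - 1]):
--         if char.isnumeric():
--             stack = []
--             for i in range(blank - 2, -1, -1):
--                 letter = lines[i][index]
--                 if letter != " ":
--                     stack.append(letter)
--             stacks.append(stack)
--     instructions = []
--     for j in range(blank + 1, len(lines)):
--         words = lines[j].split()
--         num, fr, to = words[1], words[3], words[5]
--         instructions.append((int(num), int(fr) - 1, int(to) - 1))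
--
--     return stacks, instructions
-- ===== SOURCE B (Python) =====
-- def parse(lines):
--     # Transpose the crate grid once with zip(*rows) and read the stacks off the
--     # transposed columns; parse the move lines by structural recursion.
--     blank = lines.index('\n')
--     label = lines[blank - 1]
--     rows = lines[:max(blank - 1, 0)]
--     columns = dict(enumerate(zip(*rows)))
--     stacks = [[c for c in reversed(columns.get(i, ())) if c != ' ']
--               for i, ch in enumerate(label) if ch.isnumeric()]
--
--     def moves(rest):
--         if not rest:
--             return []
--         w = rest[0].split()
--         return [(int(w[1]), int(w[3]) - 1, int(w[5]) - 1)] + moves(rest[1:])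
--
--     return stacks, moves(lines[blank + 1:])
-- ===== Notes on version B (the rewrite author's own statement) =====
-- stated objective: alternative
-- what changed: B transposes the crate grid once with zip(*rows) into a dict of columns and reads each stack off its transposed column by reverse-and-filter, instead of A's nested index loops that re-scan every row per numeric label column; the move lines are parsed by structural recursion instead of an index loop.
import Mathlib
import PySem

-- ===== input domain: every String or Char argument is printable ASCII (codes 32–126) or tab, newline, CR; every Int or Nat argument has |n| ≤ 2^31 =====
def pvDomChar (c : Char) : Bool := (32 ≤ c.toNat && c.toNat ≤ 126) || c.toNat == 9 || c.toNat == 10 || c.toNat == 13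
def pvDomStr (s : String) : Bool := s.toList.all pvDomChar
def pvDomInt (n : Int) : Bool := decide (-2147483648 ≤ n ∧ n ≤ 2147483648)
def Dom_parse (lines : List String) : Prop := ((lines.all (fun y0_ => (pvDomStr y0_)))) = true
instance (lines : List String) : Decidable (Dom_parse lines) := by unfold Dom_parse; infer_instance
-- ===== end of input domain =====

-- B transposes the crate grid once (zip(*rows) into a dict of columns) and reads each stack off its
-- transposed column; the move lines are parsed by structural recursion. Same results, similar cost.

-- shared indexing helper: lines[i] (default only reached outside Pre_, where Python raises)
def lineAt (lines : List String) (i : Int) : String := PySem.List.pyGetD lines i ""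

-- shared instruction-line helper (identical code in both Pythons); defaults only outside Pre_
def instOf (line : String) : Int × Int × Int :=
  let words := PySem.Str.split₀ line
  ((PySem.Int.ofStr? (words.getD 1 "")).getD 0,
   (PySem.Int.ofStr? (words.getD 3 "")).getD 0 - 1,
   (PySem.Int.ofStr? (words.getD 5 "")).getD 0 - 1)

-- ===== PORT A =====
-- A's while loop hunting for the blank line (value unused when "\n" ∉ lines: Python raises, outside Pre_)
def findNl : List String → Nat → Nat
  | [], b => b
  | l :: ls, b => if l = "\n" then b else findNl ls (b + 1)

-- char.isnumeric() ported as isdigit: exact on the ASCII domain Dom_parse admits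
def parse (lines : List String) : List (List String) × (List (Int × Int × Int)) :=
  let blank : Int := (findNl lines 0 : Nat)
  let sts := (PySem.List.enumerate (lineAt lines (blank - 1)).toList 0).foldl
    (fun sts p =>
      if PySem.Chars.isdigit p.2 then
        sts ++ [(PySem.List.pyRange (blank - 2) (-1) (-1)).foldl
          (fun st i =>
            let letter := (PySem.Str.pyGet? (lineAt lines i) p.1).getD ' '
            if letter ≠ ' ' then st ++ [String.ofList [letter]] else st) []]
      else sts) []
  let instructions := (PySem.List.pyRange (blank + 1) (lines.length : Int) 1).foldl
    (fun acc j => acc ++ [instOf (lineAt lines j)]) []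
  (sts, instructions)

-- ===== PORT B =====
-- hand port of Python's zip(*rows): truncating transpose, exact (zip stops at the shortest row)
def zipStar : List (List Char) → List (List Char)
  | [] => []
  | r :: rs =>
      if r.isEmpty || rs.any (fun x => x.isEmpty) then []
      else (r.headD ' ' :: rs.map (fun x => x.headD ' ')) :: zipStar (r.tail :: rs.map (fun x => x.tail))
termination_by rows => (rows.headD []).length
decreasing_by
  simp only [List.headD_cons]
  cases r with
  | nil => simp at *
  | cons c cs => simp

-- B's recursive helper over the instruction lines
def movesB : List String → List (Int × Int × Int)
  | [] => []
  | l :: rest => instOf l :: movesB rest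

def parse_alt (lines : List String) : List (List String) × (List (Int × Int × Int)) :=
  let blank : Int := ((PySem.List.index? lines "\n").getD 0 : Nat)
  let label := lineAt lines (blank - 1)
  let rows := PySem.List.slice lines none (some (max (blank - 1) 0))
  let columns := (PySem.List.enumerate (zipStar (rows.map String.toList)) 0).foldl
    (fun d p => d.insert p.1 p.2) (PySem.Dict.empty)
  let sts := (PySem.List.enumerate label.toList 0).foldl
    (fun acc p =>
      if PySem.Chars.isdigit p.2 then
        acc ++ [((columns.getD p.1 []).reverse.filter (fun c => c ≠ ' ')).map
          (fun c => String.ofList [c])]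
      else acc) []
  (sts, movesB (PySem.List.slice lines (some (blank + 1)) none))

-- ===== PRECONDITION & SPEC =====
-- Pre_ = exactly the inputs A returns on: a "\n" line exists (else the while loop runs off the
-- end, IndexError); every grid row is long enough at each numeric label column (else
-- lines[i][index] raises); every instruction line has ≥ 6 words whose 2nd/4th/6th parse as ints
-- (else IndexError/ValueError).
def Pre_parse (lines : List String) : Prop :=
  "\n" ∈ lines ∧
  (∀ p ∈ PySem.List.enumerate (PySem.List.pyGetD lines ((lines.idxOf "\n" : Int) - 1) "").toList 0,
      PySem.Chars.isdigit p.2 = true →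
        ∀ row ∈ lines.take (lines.idxOf "\n" - 1), p.1 < (row.toList.length : Int)) ∧
  (∀ line ∈ lines.drop (lines.idxOf "\n" + 1),
      6 ≤ (PySem.Str.split₀ line).length ∧
      (PySem.Int.ofStr? ((PySem.Str.split₀ line).getD 1 "")).isSome = true ∧
      (PySem.Int.ofStr? ((PySem.Str.split₀ line).getD 3 "")).isSome = true ∧
      (PySem.Int.ofStr? ((PySem.Str.split₀ line).getD 5 "")).isSome = true)
instance (lines : List String) : Decidable (Pre_parse lines) := by unfold Pre_parse; infer_instance

def pvWitness_parse : List String :=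
  ["[a]\n", " 1 \n", "\n", "move 1 from 1 to 1\n"]

def Spec_parse (lines : List String) (out : List (List String) × (List (Int × Int × Int))) : Prop := out = parse_alt lines
instance (lines : List String) (out : List (List String) × (List (Int × Int × Int))) : Decidable (Spec_parse lines out) := by unfold Spec_parse; infer_instance

-- ===== CLAIM (what is proved, stated in full; the proofs are below) =====
def Claim_equal_parse : Prop := ∀ (lines : List String), Dom_parse lines → Pre_parse lines → Spec_parse lines (parse lines)

-- ===== LEMMAS AND PROOFS =====

theorem countdown_map (xs : List String) (t : Nat) (ht : t ≤ xs.length) :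
    (PySem.List.pyRange ((t : Int) - 1) (-1) (-1)).map (fun j => lineAt xs j)
      = (xs.take t).reverse := by
  induction t with
  | zero => rw [PySem.List.pyRange_neg_one_eq_nil (by omega : ((0:Nat):Int) - 1 ≤ -1)]; simp
  | succ t ih =>
    have h1 : ((t + 1 : Nat) : Int) - 1 = (t : Int) := by push_cast; ring
    rw [h1, PySem.List.pyRange_neg_one_cons (by omega : (-1 : Int) < (t : Int))]
    have ht' : t < xs.length := by omega
    rw [List.map_cons, ih (by omega)]
    rw [List.take_add_one, List.getElem?_eq_getElem ht']
    simp only [Option.toList_some, List.reverse_append, List.reverse_cons, List.reverse_nil,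
      List.nil_append, List.singleton_append, List.cons.injEq]
    refine ⟨?_, trivial⟩
    simp [lineAt, List.getD_eq_getElem?_getD, List.getElem?_eq_getElem ht']

theorem countdown_map' (xs : List String) (b : Int) (hlen : b - 1 ≤ (xs.length : Int)) :
    (PySem.List.pyRange (b - 2) (-1) (-1)).map (fun j => lineAt xs j)
      = (xs.take (b - 1).toNat).reverse := by
  by_cases hb : b ≤ 1
  · rw [PySem.List.pyRange_neg_one_eq_nil (by omega : b - 2 ≤ -1)]
    have : (b - 1).toNat = 0 := by omega
    simp [this]
  · have h1 : b - 2 = (((b - 1).toNat : Nat) : Int) - 1 := by omega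
    rw [h1]
    exact countdown_map xs (b - 1).toNat (by omega)

theorem dictEnum_getD {α : Type} (xs : List α) (s k : Int) (d : PySem.Dict Int α) (dflt : α) :
    ((PySem.List.enumerate xs s).foldl (fun d p => d.insert p.1 p.2) d).getD k dflt
      = if s ≤ k ∧ k < s + xs.length then PySem.List.pyGetD xs (k - s) dflt
        else d.getD k dflt := by
  induction xs generalizing s d with
  | nil => simp [PySem.List.enumerate_nil]
  | cons x xs ih =>
    rw [PySem.List.enumerate_cons]
    simp only [List.foldl_cons]
    rw [ih]
    by_cases hk : k = s
    · subst hk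
      simp [PySem.Dict.getD_insert_self]
    · by_cases h2 : s + 1 ≤ k ∧ k < s + 1 + xs.length
      · rw [if_pos h2, if_pos (by simp only [List.length_cons] at *; push_cast at h2 ⊢; omega)]
        obtain ⟨m, hm⟩ : ∃ m : Nat, k - s = ((m + 1 : Nat) : Int) := ⟨(k - s - 1).toNat, by omega⟩
        have hm' : k - (s + 1) = ((m : Nat) : Int) := by push_cast at hm ⊢; omega
        rw [hm, hm', PySem.List.pyGetD_natCast, PySem.List.pyGetD_natCast, List.getD_cons_succ]
      · rw [if_neg h2, if_neg (by simp only [List.length_cons] at *; push_cast at h2 ⊢; omega)]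
        simp [PySem.Dict.getD_insert_of_ne, hk]

theorem zipStar_spec (i : Nat) (rowsC : List (List Char))
    (h : ∀ r ∈ rowsC, i < r.length) (hne : rowsC ≠ []) :
    i < (zipStar rowsC).length ∧
      (zipStar rowsC).getD i [] = rowsC.map (fun r => r.getD i ' ') := by
  induction i generalizing rowsC with
  | zero =>
    cases rowsC with
    | nil => simp at hne
    | cons r rs =>
      have hguard : ¬ (r.isEmpty || rs.any (fun x => x.isEmpty)) = true := by
        simp only [Bool.or_eq_true, List.any_eq_true, not_or]
        refine ⟨?_, ?_⟩
        · have := h r (by simp); simp [List.isEmpty_iff]; intro hr; subst hr; simp at this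
        · rintro ⟨x, hx, hxe⟩
          have := h x (by simp [hx])
          simp [List.isEmpty_iff] at hxe; subst hxe; simp at this
      rw [zipStar, if_neg hguard]
      refine ⟨by simp, ?_⟩
      simp only [List.getD_cons_zero, List.map_cons]
      simp
      exact ⟨by cases r <;> rfl, fun a _ => by cases a <;> rfl⟩
  | succ i ih =>
    cases rowsC with
    | nil => simp at hne
    | cons r rs =>
      have hguard : ¬ (r.isEmpty || rs.any (fun x => x.isEmpty)) = true := by
        simp only [Bool.or_eq_true, List.any_eq_true, not_or]
        refine ⟨?_, ?_⟩
        · have := h r (by simp); simp [List.isEmpty_iff]; intro hr; subst hr; simp at this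
        · rintro ⟨x, hx, hxe⟩
          have := h x (by simp [hx])
          simp [List.isEmpty_iff] at hxe; subst hxe; simp at this
      have h' : ∀ x ∈ (r.tail :: rs.map (fun x => x.tail)), i < x.length := by
        intro x hx
        rcases List.mem_cons.mp hx with hx | hx
        · subst hx
          have := h r (by simp)
          simp [List.length_tail]; omega
        · rcases List.mem_map.mp hx with ⟨y, hy, rfl⟩
          have := h y (by simp [hy])
          simp [List.length_tail]; omega
      obtain ⟨hl, he⟩ := ih (r.tail :: rs.map (fun x => x.tail)) h' (by simp)
      rw [zipStar, if_neg hguard]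
      refine ⟨by simpa using Nat.succ_lt_succ hl, ?_⟩
      simp only [List.getD_cons_succ, List.map_cons]
      rw [he]
      simp

theorem colOf_eq (rows : List String) (k : Nat)
    (hk : ∀ row ∈ rows, (k : Int) < (row.toList.length : Int)) :
    ((PySem.List.enumerate (zipStar (rows.map String.toList)) 0).foldl
        (fun d p => d.insert p.1 p.2) PySem.Dict.empty).getD (k : Int) []
      = rows.map (fun row => row.toList.getD k ' ') := by
  rw [dictEnum_getD]
  cases rows with
  | nil =>
    rw [if_neg (by simp [zipStar])]
    simp [PySem.Dict.empty, PySem.Dict.getD, PySem.Dict.get?]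
  | cons r rs =>
    have h' : ∀ x ∈ (r :: rs).map String.toList, k < x.length := by
      intro x hx
      rcases List.mem_map.mp hx with ⟨y, hy, rfl⟩
      have := hk y hy
      omega
    obtain ⟨hl, he⟩ := zipStar_spec k ((r :: rs).map String.toList) h' (by simp)
    rw [if_pos (by constructor <;> [positivity; (push_cast; omega)])]
    have hsub : (k : Int) - 0 = ((k : Nat) : Int) := by omega
    rw [hsub, PySem.List.pyGetD_natCast]
    simp only [List.getD_eq_getElem?_getD] at he ⊢
    rw [he, List.map_map]
    rfl

theorem findNl_eq_idxOf (ls : List String) (b : Nat) (h : "\n" ∈ ls) :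
    findNl ls b = b + ls.idxOf "\n" := by
  induction ls generalizing b with
  | nil => cases h
  | cons x xs ih =>
    by_cases hx : x = "\n"
    · subst hx; simp [findNl]
    · have hmem : "\n" ∈ xs := by
        rcases List.mem_cons.mp h with h' | h'
        · exact absurd h'.symm hx
        · exact h'
      simp [findNl, hx, ih _ hmem]
      omega

theorem indexGetD_eq_idxOf (ls : List String) (h : "\n" ∈ ls) :
    (PySem.List.index? ls "\n").getD 0 = ls.idxOf "\n" := by
  induction ls with
  | nil => cases h
  | cons x xs ih =>
    by_cases hx : x = "\n"
    · subst hx; rw [PySem.List.index?_cons_self]; simp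
    · have hmem : "\n" ∈ xs := by
        rcases List.mem_cons.mp h with h' | h'
        · exact absurd h'.symm hx
        · exact h'
      have ih' := ih hmem
      rw [PySem.List.index?_cons_of_ne _ hx]
      have hs := (PySem.List.index?_isSome_iff xs "\n").mpr hmem
      rcases Option.isSome_iff_exists.mp hs with ⟨k, hk⟩
      rw [hk] at ih' ⊢
      simp only [Option.map_some, Option.getD_some] at ih' ⊢
      simp [hx, ih']

theorem movesB_eq_map (ls : List String) : movesB ls = ls.map instOf := by
  induction ls with
  | nil => rfl
  | cons l rest ih => simp [movesB, ih]

theorem parse_eq_parse_alt (lines : List String) (hpre : Pre_parse lines) :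
    parse lines = parse_alt lines := by
  obtain ⟨h1, h2, -⟩ := hpre
  unfold parse parse_alt
  rw [indexGetD_eq_idxOf lines h1, findNl_eq_idxOf lines 0 h1]
  simp only [Nat.zero_add]
  set b : Int := ((lines.idxOf "\n" : Nat) : Int) with hb
  have hbpos : 0 ≤ b := by positivity
  have hblen : b < (lines.length : Int) := by
    have := List.idxOf_lt_length_of_mem h1
    omega
  have hslice : PySem.List.slice lines none (some (max (b - 1) 0)) = lines.take (b - 1).toNat := by
    rw [PySem.List.slice_to _ (by positivity)]
    congr 1
    omega
  simp only [Prod.mk.injEq]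
  refine ⟨?_, ?_⟩
  · -- stacks
    rw [PySem.List.foldl_append_if, PySem.List.foldl_append_if]
    simp only [List.nil_append]
    apply List.map_congr_left
    intro p hp
    rw [List.mem_filter] at hp
    obtain ⟨hpmem, hpdig⟩ := hp
    rcases (PySem.List.mem_enumerate_iff _ _ _).mp hpmem with ⟨k, hklt, hpk⟩
    have hp1 : p.1 = (k : Int) := by rw [hpk]; simp
    have hcols : ∀ row ∈ lines.take (b - 1).toNat, (k : Int) < (row.toList.length : Int) := by
      intro row hrow
      have := h2 p (by simpa [lineAt] using hpmem) hpdig row (by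
        have : (b - 1).toNat = lines.idxOf "\n" - 1 := by omega
        rwa [this] at hrow)
      omega
    rw [hslice, hp1]
    rw [colOf_eq _ k hcols]
    -- A side: fold over the countdown range = fold over the reversed taken rows
    rw [show (fun (st : List String) (i : Int) =>
          let letter := (PySem.Str.pyGet? (lineAt lines i) (k : Int)).getD ' '
          if letter ≠ ' ' then st ++ [String.ofList [letter]] else st)
        = (fun (st : List String) (i : Int) =>
          (fun (row : String) (st : List String) =>
            let letter := (PySem.Str.pyGet? row (k : Int)).getD ' '
            if letter ≠ ' ' then st ++ [String.ofList [letter]] else st) (lineAt lines i) st)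
        from rfl]
    rw [← List.foldl_map (f := fun j => lineAt lines j)
        (g := fun (st : List String) (row : String) =>
            let letter := (PySem.Str.pyGet? row (k : Int)).getD ' '
            if letter ≠ ' ' then st ++ [String.ofList [letter]] else st)]
    rw [countdown_map' lines b (by omega)]
    rw [PySem.List.foldl_append_ite]
    simp only [List.nil_append]
    -- B side: push reverse/filter/map through the row map
    rw [← List.map_reverse, List.filter_map, List.map_map]
    have key : ∀ row : String,
        (PySem.Str.pyGet? row (k : Int)).getD ' ' = row.toList.getD k ' ' := by
      intro row
      rw [PySem.Str.pyGet?_natCast]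
      simp [List.getD_eq_getElem?_getD]
    simp only [Function.comp_def, key]
  · -- instructions
    simp only [lineAt]
    rw [PySem.List.foldl_pyRange_pyGetD' (xs := lines) (a := b + 1) (f := fun acc line => acc ++ [instOf line]) (d := "") (init := ([] : List (Int × Int × Int))) (by omega)]
    rw [PySem.List.slice_from _ (by omega), movesB_eq_map]
    rw [PySem.List.foldl_append_singleton_eq_map]
    rfl

-- ===== VERDICT (by name: the statement is the Claim_ definition above) =====
theorem parse_spec : Claim_equal_parse := by
  intro lines _ hpre
  unfold Spec_parse
  exact parse_eq_parse_alt lines hpre
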